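-- pv_equiv track=rewrite | github.com/SzymonLeszkiewicz/Matury | Matury stara formuła/2015/programming - słowa binarne/main.py | blok
-- ===== SOURCE A (Python) =====
-- def blok(x):
--     czy_przejscie = False
--
--     if x[0] == '1':
--         return False
--     for i in range(len(x) - 1):
--
--         if x[i] != x[i + 1] and czy_przejscie == False:
--             czy_przejscie = True
--         elif x[i] != x[i + 1] and czy_przejscie == True:
--             return False
--     return czy_przejscie
-- ===== SOURCE B (Python) =====
-- def blok(x):
--     if x[0] == '1':
--         return False
--     rest = x.lstrip(x[0])
--     return bool(rest) and len(set(rest)) == 1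
-- ===== Notes on version B (the rewrite author's own statement) =====
-- stated objective: faster
-- what changed: Replaces the adjacent-pair scan with a transition flag by a run-structure check: strip the leading run with lstrip and accept iff a nonempty remainder consists of a single character (exactly two runs).
import Mathlib
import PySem

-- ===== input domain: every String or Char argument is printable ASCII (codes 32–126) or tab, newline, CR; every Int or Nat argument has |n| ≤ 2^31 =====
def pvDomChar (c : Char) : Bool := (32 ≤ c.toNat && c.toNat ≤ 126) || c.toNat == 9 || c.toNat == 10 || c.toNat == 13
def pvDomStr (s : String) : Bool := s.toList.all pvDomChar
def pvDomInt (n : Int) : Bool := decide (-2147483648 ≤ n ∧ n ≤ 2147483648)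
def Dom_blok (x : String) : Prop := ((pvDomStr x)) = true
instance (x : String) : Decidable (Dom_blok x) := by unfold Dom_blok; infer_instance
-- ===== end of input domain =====

-- B checks the run structure (strip the leading run, then the remainder must be one repeated character)
-- instead of A's adjacent-pair scan with a transition flag; equivalence of return values is proved on
-- nonempty strings (A raises IndexError on "").

-- ===== PORT A =====
-- the for-loop over i with x[i]/x[i+1]: structural recursion over adjacent pairs (prev = x[i]),
-- carrying the flag czy_przejscie; returning false models the early 'return False'
def blokGo (prev : Char) (l : List Char) (czy : Bool) : Bool :=
  match l with
  | [] => czy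
  | c :: rest =>
    if prev != c && czy == false then blokGo c rest true
    else if prev != c && czy == true then false
    else blokGo c rest czy

def blok (x : String) : Bool :=
  match x.toList with
  | [] => false  -- unreachable under Pre_blok (A raises IndexError on "")
  | c :: rest => if c == '1' then false else blokGo c rest false

-- ===== PORT B =====
-- x.lstrip(x[0]) with a single-character argument = dropWhile (== x[0]); 'len(set(rest)) == 1' on a
-- nonempty rest = all characters equal the first; both exact on this domain
def blok_alt (x : String) : Bool :=
  match x.toList with
  | [] => false  -- unreachable under Pre_blok (B raises IndexError on "")
  | c :: rest =>
    if c == '1' then false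
    else
      match (c :: rest).dropWhile (· == c) with
      | [] => false
      | d :: rs => rs.all (· == d)

-- ===== PRECONDITION & SPEC =====
-- Pre_ excludes only the empty string, on which A raises IndexError at x[0]
def Pre_blok (x : String) : Prop := x ≠ ""
instance (x : String) : Decidable (Pre_blok x) := by unfold Pre_blok; infer_instance
def pvWitness_blok : String := "0011"

def Spec_blok (x : String) (out : Bool) : Prop := out = blok_alt x
instance (x : String) (out : Bool) : Decidable (Spec_blok x out) := by unfold Spec_blok; infer_instance

-- ===== CLAIM (what is proved, stated in full; the proofs are below) =====
def Claim_equal_blok : Prop := ∀ (x : String), Dom_blok x → Pre_blok x → Spec_blok x (blok x)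

-- ===== LEMMAS AND PROOFS =====

-- once the flag is set, the loop returns true iff every remaining char equals prev
theorem blokGo_true (l : List Char) (prev : Char) :
    blokGo prev l true = l.all (· == prev) := by
  induction l generalizing prev with
  | nil => rfl
  | cons c rest ih =>
    by_cases h : prev = c
    · subst h
      simp [blokGo, List.all_cons, ih]
    · have hne : (prev != c) = true := by simp [bne, h]
      simp [blokGo, hne, List.all_cons, beq_false_of_ne (Ne.symm h)]

-- with the flag clear, the loop skips the leading run of prev, then behaves as blokGo … true
theorem blokGo_false (l : List Char) (prev : Char) :
    blokGo prev l false =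
      (match l.dropWhile (· == prev) with
       | [] => false
       | d :: rs => blokGo d rs true) := by
  induction l generalizing prev with
  | nil => rfl
  | cons c rest ih
  => by_cases h : prev = c
     · subst h
       simp [blokGo, ih]
     · have hne : (prev != c) = true := by simp [bne, h]
       simp [blokGo, hne, beq_false_of_ne (Ne.symm h)]

-- ===== VERDICT (by name: the statement is the Claim_ definition above) =====
theorem blok_spec : Claim_equal_blok := by
  intro x _ _
  unfold Spec_blok blok blok_alt
  cases hx : x.toList with
  | nil => rfl
  | cons c rest =>
    by_cases h1 : c = '1'
    · simp [h1]
    · simp only [beq_false_of_ne h1]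
      rw [blokGo_false]
      simp only [List.dropWhile_cons, beq_self_eq_true, if_true]
      cases rest.dropWhile (· == c) with
      | nil => rfl
      | cons d rs => simp [blokGo_true]
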